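-- pv_equiv track=rewrite | github.com/papiS23/learnPython | Matura/zadanieLiczbyPapis.py | najwiekszaIloscJedynekBin
-- ===== SOURCE A (Python) =====
-- def najwiekszaIloscJedynekBin(plik):
--     najwieksza = 0
--     najwieksze = []
--     for num in plik:
--         if bin(int(num))[2:].count('1') > najwieksza:
--             najwieksza = bin(int(num))[2:].count('1')
--             najwieksze.clear()
--             najwieksze.append(num)
--         elif bin(int(num))[2:].count('1') == najwieksza:
--             najwieksze.append(num)
--     return najwieksza, najwieksze
-- ===== SOURCE B (Python) =====
-- def najwiekszaIloscJedynekBin(plik):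
--     pairs = [(num, int(num).bit_count()) for num in plik]
--     if not pairs:
--         return 0, []
--     najwieksza = max(c for _, c in pairs)
--     return najwieksza, [num for num, c in pairs if c == najwieksza]
-- ===== Notes on version B (the rewrite author's own statement) =====
-- stated objective: simpler
-- what changed: Replaced A's running-max loop that conditionally clears/appends an accumulator list with a build-pairs / max / filter decomposition: compute each popcount once via int(num).bit_count(), take the max of the counts, then filter the pairs in order.
-- outside the precondition, e.g. on najwiekszaIloscJedynekBin(['abc']): A raises ValueError, B raises ValueError
import Mathlib
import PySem

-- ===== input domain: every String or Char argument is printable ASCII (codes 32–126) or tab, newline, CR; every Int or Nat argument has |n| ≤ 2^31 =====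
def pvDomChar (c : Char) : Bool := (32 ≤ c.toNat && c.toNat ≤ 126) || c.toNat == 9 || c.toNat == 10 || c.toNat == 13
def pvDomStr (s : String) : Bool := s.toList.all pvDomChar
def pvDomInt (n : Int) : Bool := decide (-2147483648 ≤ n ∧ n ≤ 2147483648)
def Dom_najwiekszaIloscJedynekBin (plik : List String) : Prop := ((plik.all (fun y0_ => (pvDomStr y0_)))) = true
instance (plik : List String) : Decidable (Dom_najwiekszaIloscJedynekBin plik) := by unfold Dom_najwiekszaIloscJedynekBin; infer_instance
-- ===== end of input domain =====

-- B replaces A's running-max/clear/append loop by a build-pairs / max / filter decomposition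
-- using int.bit_count() (objective: simpler); return values are proved equal on Pre_.

-- ===== PORT A =====
-- bin(int(num))[2:].count('1')  (int(num) is total here via getD 0; Pre_ guarantees it parses)
def pvPopA (num : String) : Int :=
  (PySem.Str.count
    (PySem.Str.slice (PySem.Int.pyBin ((PySem.Int.ofStr? num).getD 0)) (some 2) none) "1" : Int)

def najwiekszaIloscJedynekBin (plik : List String) : Int × List String :=
  plik.foldl
    (fun (st : Int × List String) num =>
      if pvPopA num > st.1 then (pvPopA num, [num])
      else if pvPopA num = st.1 then (st.1, st.2 ++ [num])
      else st)
    (0, [])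

-- ===== PORT B =====
-- int(num).bit_count()
def pvPopB (num : String) : Int :=
  (PySem.Int.bitCount ((PySem.Int.ofStr? num).getD 0) : Int)

def najwiekszaIloscJedynekBin_alt (plik : List String) : Int × List String :=
  let pairs := plik.map (fun num => (num, pvPopB num))
  if pairs.isEmpty then (0, [])
  else
    let najwieksza := (PySem.List.max? (pairs.map Prod.snd) (fun c => c)).getD 0
    (najwieksza, (pairs.filter (fun p => p.2 == najwieksza)).map Prod.fst)

-- ===== PRECONDITION & SPEC =====
-- Pre_ excludes exactly the inputs where int(num) raises ValueError (a string that does not parse as an int).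
def Pre_najwiekszaIloscJedynekBin (plik : List String) : Prop :=
  ∀ s ∈ plik, (PySem.Int.ofStr? s).isSome = true
instance (plik : List String) : Decidable (Pre_najwiekszaIloscJedynekBin plik) := by unfold Pre_najwiekszaIloscJedynekBin; infer_instance

def pvWitness_najwiekszaIloscJedynekBin : List String := ["3", "-5", " 7 ", "0", "+6"]

def Spec_najwiekszaIloscJedynekBin (plik : List String) (out : Int × List String) : Prop := out = najwiekszaIloscJedynekBin_alt plik
instance (plik : List String) (out : Int × List String) : Decidable (Spec_najwiekszaIloscJedynekBin plik out) := by unfold Spec_najwiekszaIloscJedynekBin; infer_instance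

-- ===== CLAIM (what is proved, stated in full; the proofs are below) =====
def Claim_equal_najwiekszaIloscJedynekBin : Prop := ∀ (plik : List String), Dom_najwiekszaIloscJedynekBin plik → Pre_najwiekszaIloscJedynekBin plik → Spec_najwiekszaIloscJedynekBin plik (najwiekszaIloscJedynekBin plik)

-- ===== LEMMAS AND PROOFS =====

-- counting a single character with CPython's substring count is List.count
theorem pv_count_go_single (c : Char) : ∀ (l : List Char) (fuel acc : Nat),
    l.length ≤ fuel → PySem.Chars.count.go [c] fuel l acc = acc + l.count c := by
  intro l
  induction l with
  | nil => intro fuel acc _; cases fuel <;> simp [PySem.Chars.count.go]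
  | cons h t ih =>
      intro fuel acc hf
      cases fuel with
      | zero => simp at hf
      | succ f =>
          rw [PySem.Chars.count.go]
          by_cases hc : c = h
          · subst hc
            have hp : [c].isPrefixOf (c :: t) = true := by simp [List.isPrefixOf]
            rw [hp]
            simp only [if_true, List.length_cons, List.length_nil, List.drop]
            rw [ih f (acc + 1) (by simpa using hf)]
            simp
            omega
          · have hp : [c].isPrefixOf (h :: t) = false := by
              simp [List.isPrefixOf]
              intro h'
              exact hc h'
            rw [hp]
            simp only [Bool.false_eq_true, if_false]
            rw [ih f acc (by simpa using hf)]
            simp [List.count_cons]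
            exact fun h' => hc h'.symm

theorem pv_count_single (c : Char) (l : List Char) :
    PySem.Chars.count l [c] = l.count c := by
  unfold PySem.Chars.count
  simp [pv_count_go_single c l l.length 0 le_rfl]

-- counting '1' in the binary digit string is the popcount
theorem pv_count_toDigitsCore : ∀ (n : Nat), ∀ (fuel : Nat) (ds : List Char), n < fuel →
    (Nat.toDigitsCore 2 fuel n ds).count '1'
      = PySem.Int.bitCount (n : Int) + ds.count '1' := by
  intro n
  induction n using Nat.strong_induction_on with
  | _ n ih =>
      intro fuel ds hf
      cases fuel with
      | zero => omega
      | succ f =>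
          rw [Nat.toDigitsCore]
          by_cases h2 : n / 2 = 0
          · have hn : n = 0 ∨ n = 1 := by omega
            rw [if_pos h2]
            rcases hn with hn | hn <;> subst hn <;>
              simp [Nat.digitChar, PySem.Int.bitCount_zero]
            · have : PySem.Int.bitCount (1 : Int) = 1 := by decide
              simp [this]
              omega
          · rw [if_neg h2]
            have hlt : n / 2 < n := Nat.div_lt_self (by omega) (by omega)
            have hf' : n / 2 < f := by omega
            rw [ih (n / 2) hlt f _ hf']
            have hpos : 0 < n := by omega
            rw [PySem.Int.bitCount_natCast hpos]
            rcases Nat.mod_two_eq_zero_or_one n with hm | hm <;>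
              (simp [Nat.digitChar, hm]; try omega)

theorem pv_count_toDigits (m : Nat) :
    (Nat.toDigits 2 m).count '1' = PySem.Int.bitCount (m : Int) := by
  unfold Nat.toDigits
  rw [pv_count_toDigitsCore m (m + 1) [] (by omega)]
  simp

-- bin(n)[2:].count('1') = n.bit_count(), for every int n
theorem pv_pop_eq (num : String) : pvPopA num = pvPopB num := by
  unfold pvPopA pvPopB
  set n : Int := (PySem.Int.ofStr? num).getD 0 with hn
  rw [PySem.Str.count_eq]
  have hsl : (PySem.Str.slice (PySem.Int.pyBin n) (some 2) none).toList
      = (PySem.Int.toBinChars0b n).drop 2 := by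
    rw [PySem.Str.toList_slice, PySem.Chars.slice_eq_listSlice]
    rw [PySem.List.slice_from _ (by norm_num)]
    unfold PySem.Int.pyBin
    simp
  rw [hsl]
  unfold PySem.Int.toBinChars0b
  by_cases hneg : n < 0
  · rw [if_pos hneg]
    have h1 : (('-' :: '0' :: 'b' :: Nat.toDigits 2 n.natAbs).drop 2) = 'b' :: Nat.toDigits 2 n.natAbs := rfl
    rw [h1]
    have : ("1" : String).toList = ['1'] := rfl
    rw [this, pv_count_single]
    rw [List.count_cons]
    simp only [show (('b' : Char) == '1') = false from rfl]
    rw [pv_count_toDigits]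
    have : ((n.natAbs : Int)) = -n := by omega
    rw [this, PySem.Int.bitCount_neg]
    simp
  · rw [if_neg hneg]
    have h1 : (('0' :: 'b' :: Nat.toDigits 2 n.toNat).drop 2) = Nat.toDigits 2 n.toNat := rfl
    rw [h1]
    have : ("1" : String).toList = ['1'] := rfl
    rw [this, pv_count_single, pv_count_toDigits]
    have : ((n.toNat : Int)) = n := by omega
    rw [this]

theorem pv_pop_nonneg (num : String) : 0 ≤ pvPopB num := by
  unfold pvPopB; exact Int.natCast_nonneg _

-- the loop invariant: A's fold computes (running max, filter at the running max)
theorem pv_fold_inv (l : List String) :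
    l.foldl
      (fun (st : Int × List String) num =>
        if pvPopB num > st.1 then (pvPopB num, [num])
        else if pvPopB num = st.1 then (st.1, st.2 ++ [num])
        else st)
      (0, [])
    = ((l.map pvPopB).foldl max 0,
       l.filter (fun x => pvPopB x == (l.map pvPopB).foldl max 0)) := by
  induction l using List.reverseRecOn with
  | nil => simp
  | append_singleton l x ih =>
      rw [List.foldl_append, ih]
      set M : Int := (l.map pvPopB).foldl max 0 with hM
      have hub : ∀ y ∈ l, pvPopB y ≤ M := by
        intro y hy
        have := (PySem.List.le_foldl_max (l.map pvPopB) 0).2 (pvPopB y) (List.mem_map_of_mem hy)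
        simpa [hM] using this
      have hM0 : 0 ≤ M := (PySem.List.le_foldl_max (l.map pvPopB) 0).1
      have hM' : ((l ++ [x]).map pvPopB).foldl max 0 = max M (pvPopB x) := by
        simp [hM]
      rw [List.foldl_cons, List.foldl_nil] at *
      by_cases hgt : pvPopB x > M
      · rw [if_pos hgt, hM']
        have hmx : max M (pvPopB x) = pvPopB x := by omega
        rw [hmx]
        have hfl : l.filter (fun y => pvPopB y == pvPopB x) = [] := by
          rw [List.filter_eq_nil_iff]
          intro y hy
          have := hub y hy
          simp only [beq_iff_eq]
          omega
        simp [List.filter_append, hfl]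
      · rw [if_neg hgt]
        by_cases heq : pvPopB x = M
        · rw [if_pos heq, hM']
          have hmx : max M (pvPopB x) = M := by omega
          rw [hmx]
          simp [List.filter_append, heq]
        · rw [if_neg heq, hM']
          have hmx : max M (pvPopB x) = M := by omega
          rw [hmx]
          simp [List.filter_append, heq]

-- ===== VERDICT (by name: the statement is the Claim_ definition above) =====
theorem najwiekszaIloscJedynekBin_spec : Claim_equal_najwiekszaIloscJedynekBin := by
  intro plik _hdom _hpre
  unfold Spec_najwiekszaIloscJedynekBin najwiekszaIloscJedynekBin najwiekszaIloscJedynekBin_alt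
  simp only [funext fun num => pv_pop_eq num]
  rw [pv_fold_inv]
  cases plik with
  | nil => simp
  | cons h t =>
      simp only [List.map_cons, List.isEmpty_cons, Bool.false_eq_true, if_false,
        List.map_map, Function.comp_def]
      rw [PySem.List.max?_id_cons, Option.getD_some]
      have h0 : List.foldl max 0 (pvPopB h :: List.map pvPopB t)
          = List.foldl max (pvPopB h) (List.map pvPopB t) := by
        simp only [List.foldl_cons]
        rw [max_eq_right (pv_pop_nonneg h)]
      rw [h0]
      have hlist : ((h, pvPopB h) :: List.map (fun num => (num, pvPopB num)) t)
           = (h :: t).map (fun num => (num, pvPopB num)) := rfl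
      rw [hlist, List.filter_map, List.map_map]
      simp [Function.comp_def]
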